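-- pv_equiv track=rewrite | github.com/Yukkurisiteikitai/Conver_Text2Image2Text | index.py | decode_huffman_stream_item
-- ===== SOURCE A (Python) =====
-- def decode_huffman_stream_item(bit_stream, current_pos, reverse_huffman_table, item_name="item"):
--     """
--     ビットストリームの現在位置から1つのアイテムをハフマンデコードする。
--     reverse_huffman_table: {"ビット列": 値}
--     戻り値: (デコードされた値, 新しいcurrent_pos) またはエラー
--     """
--     prefix = ""
--     # トライ木を使うとより効率的だが、ここではシンプルな前方一致探索
--     for i in range(current_pos, len(bit_stream)):
--         prefix += bit_stream[i]
--         if prefix in reverse_huffman_table: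
--             return reverse_huffman_table[prefix], i + 1
--
--     # エラー発生時のコンテキスト情報
--     context_start = max(0, current_pos - 20)
--     context_end = min(len(bit_stream), current_pos + 40) # 少し長めに表示
--     error_context = f"...{bit_stream[context_start:current_pos]}[HERE]{bit_stream[current_pos:context_end]}..."
--     raise ValueError(
--         f"Huffman decode error for {item_name}: No matching code found at position {current_pos}. "
--         f"Tried prefix up to '{prefix}'. Stream context: {error_context}"
--     )
-- ===== SOURCE B (Python) =====
-- def decode_huffman_stream_item(bit_stream, current_pos, reverse_huffman_table, item_name="item"):
--     # Try each distinct code length (ascending) and test the slice directly,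
--     # instead of growing a prefix character by character.
--     for L in sorted({len(k) for k in reverse_huffman_table if k}):
--         candidate = bit_stream[current_pos:current_pos + L]
--         if len(candidate) == L and candidate in reverse_huffman_table:
--             return reverse_huffman_table[candidate], current_pos + L
--     prefix = bit_stream[current_pos:]
--     context_start = max(0, current_pos - 20)
--     context_end = min(len(bit_stream), current_pos + 40)
--     error_context = f"...{bit_stream[context_start:current_pos]}[HERE]{bit_stream[current_pos:context_end]}..."
--     raise ValueError(
--         f"Huffman decode error for {item_name}: No matching code found at position {current_pos}. "
--         f"Tried prefix up to '{prefix}'. Stream context: {error_context}"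
--     )
-- ===== Notes on version B (the rewrite author's own statement) =====
-- stated objective: alternative
-- what changed: B replaces A's character-by-character growing-prefix scan of the stream by iterating over the sorted distinct code lengths of the table and testing one slice of the stream per length.
-- outside the precondition, e.g. on decode_huffman_stream_item('abc', -1, {'c': 5}, 'item'): A returns (5, 0), B raises ValueError
import Mathlib
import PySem

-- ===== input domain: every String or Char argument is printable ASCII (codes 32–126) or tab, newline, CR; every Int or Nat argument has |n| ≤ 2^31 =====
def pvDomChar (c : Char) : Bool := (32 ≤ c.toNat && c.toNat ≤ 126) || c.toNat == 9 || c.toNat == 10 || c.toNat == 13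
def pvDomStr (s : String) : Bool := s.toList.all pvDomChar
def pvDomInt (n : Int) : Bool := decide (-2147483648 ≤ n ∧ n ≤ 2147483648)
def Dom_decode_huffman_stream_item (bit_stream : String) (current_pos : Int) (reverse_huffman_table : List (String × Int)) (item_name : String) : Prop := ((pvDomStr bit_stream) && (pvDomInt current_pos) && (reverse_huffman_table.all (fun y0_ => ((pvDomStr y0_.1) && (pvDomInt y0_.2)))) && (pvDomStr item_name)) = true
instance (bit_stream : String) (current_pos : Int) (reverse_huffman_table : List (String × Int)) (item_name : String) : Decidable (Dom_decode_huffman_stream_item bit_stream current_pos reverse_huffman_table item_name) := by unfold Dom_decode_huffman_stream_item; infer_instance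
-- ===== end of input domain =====

-- B replaces A's grow-the-prefix-character-by-character scan by trying only the distinct code
-- lengths (ascending) and slicing the candidate directly (objective: alternative decomposition).

-- ===== PORT A =====
-- the 'for i in range(current_pos, len(bit_stream))' loop, accumulating prefix
def pvAGo (cs : List Char) (tbl : PySem.Dict String Int) : List Int → List Char → Option (Int × Int)
  | [], _ => none
  | i :: rest, pfx =>
    match PySem.List.pyGet? cs i with
    | none => none                -- IndexError (excluded by Pre_)
    | some c =>
      match tbl.get? (String.ofList (pfx ++ [c])) with
      | some v => some (v, i + 1)
      | none => pvAGo cs tbl rest (pfx ++ [c])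

def decode_huffman_stream_item (bit_stream : String) (current_pos : Int) (reverse_huffman_table : List (String × Int)) (item_name : String) : Int × Int :=
  match pvAGo bit_stream.toList (PySem.Dict.mk reverse_huffman_table)
      (PySem.List.pyRange current_pos ((bit_stream.toList.length : Int)) 1) [] with
  | some r => r
  | none => (0, 0)                -- ValueError path (excluded by Pre_)

-- ===== PORT B =====
-- the 'for L in sorted({len(k) for k in reverse_huffman_table if k})' loop
def pvBGo (cs : List Char) (tbl : PySem.Dict String Int) (p : Int) : List Int → Option (Int × Int)
  | [] => none
  | L :: rest =>
    let cand := PySem.List.slice cs (some p) (some (p + L))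
    if (cand.length : Int) = L then
      match tbl.get? (String.ofList cand) with
      | some v => some (v, p + L)
      | none => pvBGo cs tbl p rest
    else pvBGo cs tbl p rest

def decode_huffman_stream_item_alt (bit_stream : String) (current_pos : Int) (reverse_huffman_table : List (String × Int)) (item_name : String) : Int × Int :=
  match pvBGo bit_stream.toList (PySem.Dict.mk reverse_huffman_table) current_pos
      (PySem.List.sorted (PySem.Set.ofList (reverse_huffman_table.filterMap
        (fun kv => if kv.1.toList = [] then none else some ((kv.1.toList.length : Int))))) (fun x => x) false) with
  | some r => r
  | none => (0, 0)                -- ValueError path (excluded by Pre_)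

-- ===== PRECONDITION & SPEC =====
-- Pre_ excludes the inputs on which A raises (ValueError when no code matches, IndexError when
-- current_pos is below -len(bit_stream)), and the negative current_pos inputs whose shortest
-- matching code reaches index 0 or beyond, where A's returned value is an accident of Python's
-- per-character negative-index wraparound and B raises ValueError.
def Pre_decode_huffman_stream_item (bit_stream : String) (current_pos : Int) (reverse_huffman_table : List (String × Int)) (item_name : String) : Prop :=
  (0 ≤ current_pos ∧ ∃ kv ∈ reverse_huffman_table, kv.1.toList ≠ [] ∧
      current_pos.toNat + kv.1.toList.length ≤ bit_stream.toList.length ∧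
      (bit_stream.toList.drop current_pos.toNat).take kv.1.toList.length = kv.1.toList)
  ∨ (current_pos < 0 ∧ (-current_pos).toNat ≤ bit_stream.toList.length ∧
      ∃ kv ∈ reverse_huffman_table, kv.1.toList ≠ [] ∧ kv.1.toList.length < (-current_pos).toNat ∧
      (bit_stream.toList.drop (bit_stream.toList.length - (-current_pos).toNat)).take kv.1.toList.length = kv.1.toList)
instance (bit_stream : String) (current_pos : Int) (reverse_huffman_table : List (String × Int)) (item_name : String) : Decidable (Pre_decode_huffman_stream_item bit_stream current_pos reverse_huffman_table item_name) := by unfold Pre_decode_huffman_stream_item; infer_instance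

def pvWitness_decode_huffman_stream_item : String × Int × (List (String × Int)) × String := ("0110", 0, [("0", 7), ("11", 3)], "item")

def Spec_decode_huffman_stream_item (bit_stream : String) (current_pos : Int) (reverse_huffman_table : List (String × Int)) (item_name : String) (out : Int × Int) : Prop := out = decode_huffman_stream_item_alt bit_stream current_pos reverse_huffman_table item_name
instance (bit_stream : String) (current_pos : Int) (reverse_huffman_table : List (String × Int)) (item_name : String) (out : Int × Int) : Decidable (Spec_decode_huffman_stream_item bit_stream current_pos reverse_huffman_table item_name out) := by unfold Spec_decode_huffman_stream_item; infer_instance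

-- ===== CLAIM (what is proved, stated in full; the proofs are below) =====
def Claim_equal_decode_huffman_stream_item : Prop := ∀ (bit_stream : String) (current_pos : Int) (reverse_huffman_table : List (String × Int)) (item_name : String), Dom_decode_huffman_stream_item bit_stream current_pos reverse_huffman_table item_name → Pre_decode_huffman_stream_item bit_stream current_pos reverse_huffman_table item_name → Spec_decode_huffman_stream_item bit_stream current_pos reverse_huffman_table item_name (decode_huffman_stream_item bit_stream current_pos reverse_huffman_table item_name)

-- ===== LEMMAS AND PROOFS =====

-- A's scan, started at offset t into the search, returns the code of minimal length L0.
lemma pvAGo_finds (cs : List Char) (tbl : PySem.Dict String Int) (v : Int) (p : Int) (b L0 : Nat)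
    (hend : p + (L0 : Int) ≤ (cs.length : Int))
    (hchar : ∀ t : Nat, t < L0 → b + t < cs.length ∧ PySem.List.pyGet? cs (p + (t : Int)) = cs[b + t]?)
    (hv : tbl.get? (String.ofList ((cs.drop b).take L0)) = some v)
    (hmin : ∀ L : Nat, 1 ≤ L → L < L0 → tbl.get? (String.ofList ((cs.drop b).take L)) = none) :
    ∀ t : Nat, t < L0 →
      pvAGo cs tbl (PySem.List.pyRange (p + (t : Int)) (cs.length : Int) 1) ((cs.drop b).take t)
        = some (v, p + (L0 : Int)) := by
  suffices h : ∀ d t, t < L0 → L0 - t ≤ d →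
      pvAGo cs tbl (PySem.List.pyRange (p + (t : Int)) (cs.length : Int) 1) ((cs.drop b).take t)
        = some (v, p + (L0 : Int)) by
    intro t ht; exact h (L0 - t) t ht le_rfl
  intro d
  induction d with
  | zero => intro t ht hle; omega
  | succ d ih =>
    intro t ht hle
    obtain ⟨hbt, hcget⟩ := hchar t ht
    have hlt : p + (t : Int) < (cs.length : Int) := by omega
    rw [PySem.List.pyRange_one_cons hlt]
    have hget : PySem.List.pyGet? cs (p + (t : Int)) = some cs[b + t] := by
      rw [hcget, List.getElem?_eq_getElem hbt]
    have htd : t < (cs.drop b).length := by simp [List.length_drop]; omega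
    have hpfx : (cs.drop b).take t ++ [cs[b + t]] = (cs.drop b).take (t + 1) := by
      rw [List.take_add_one, List.getElem?_eq_getElem htd]
      simp [List.getElem_drop]
    simp only [pvAGo, hget, hpfx]
    by_cases hL : t + 1 = L0
    · rw [hL, hv]
      have : p + (t : Int) + 1 = p + (L0 : Int) := by omega
      simp [this]
    · have h1 : t + 1 < L0 := by omega
      rw [hmin (t + 1) (by omega) h1]
      have : p + (t : Int) + 1 = p + ((t + 1 : Nat) : Int) := by push_cast; ring
      rw [this]
      exact ih (t + 1) h1 (by omega)

-- B's scan over an increasing list of candidate lengths containing L0 returns the same code.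
lemma pvBGo_finds (cs : List Char) (tbl : PySem.Dict String Int) (v : Int) (p : Int) (b L0 : Nat)
    (hOk : (PySem.List.slice cs (some p) (some (p + (L0 : Int)))).length = L0)
    (hsl : PySem.List.slice cs (some p) (some (p + (L0 : Int))) = (cs.drop b).take L0)
    (hm : ∀ m : Nat, 1 ≤ m → m < L0 →
      (PySem.List.slice cs (some p) (some (p + (m : Int)))).length = m →
      PySem.List.slice cs (some p) (some (p + (m : Int))) = (cs.drop b).take m)
    (hv : tbl.get? (String.ofList ((cs.drop b).take L0)) = some v)
    (hmin : ∀ L : Nat, 1 ≤ L → L < L0 → tbl.get? (String.ofList ((cs.drop b).take L)) = none) :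
    ∀ ls : List Int, ls.Pairwise (· < ·) → ((L0 : Int) ∈ ls) →
      (∀ x ∈ ls, ∃ m : Nat, x = (m : Int) ∧ 1 ≤ m) →
      pvBGo cs tbl p ls = some (v, p + (L0 : Int)) := by
  intro ls
  induction ls with
  | nil => intro _ hmem _; cases hmem
  | cons a rest ih =>
    intro hpw hmem hpos
    obtain ⟨m, rfl, hm1⟩ := hpos a (List.mem_cons_self ..)
    by_cases hma : m = L0
    · subst hma
      simp only [pvBGo]
      rw [if_pos (by rw [hOk]), hsl, hv]
    · have hrest : (L0 : Int) ∈ rest := by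
        rcases List.mem_cons.mp hmem with h | h
        · exact absurd (by exact_mod_cast h.symm) hma
        · exact h
      have hlt : m < L0 := by
        have := (List.pairwise_cons.mp hpw).1 _ hrest
        exact_mod_cast this
      have htail : pvBGo cs tbl p rest = some (v, p + (L0 : Int)) :=
        ih (List.pairwise_cons.mp hpw).2 hrest (fun x hx => hpos x (List.mem_cons_of_mem _ hx))
      simp only [pvBGo]
      by_cases hlen : ((PySem.List.slice cs (some p) (some (p + (m : Int)))).length : Int) = (m : Int)
      · rw [if_pos hlen, hm m hm1 hlt (by exact_mod_cast hlen), hmin m hm1 hlt]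
        exact htail
      · rw [if_neg hlen]
        exact htail

-- a key present in the table is found by lookup
lemma pv_get?_isSome_of_mem (tbl : List (String × Int)) (kv : String × Int) (hmem : kv ∈ tbl) :
    ((PySem.Dict.mk tbl).get? kv.1).isSome := by
  rw [Option.isSome_iff_ne_none]
  intro hnone
  have : kv.1 ∉ (PySem.Dict.mk tbl).keys := (PySem.Dict.get?_eq_none_iff_not_mem_keys _ _).mp hnone
  exact this (by simp [PySem.Dict.keys]; exact ⟨kv.2, hmem⟩)

-- the length of the found code occurs in B's candidate-length list
lemma pv_len_mem_lengths (tbl : List (String × Int)) (s : List Char) (v : Int)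
    (h1 : s ≠ []) (hv : (PySem.Dict.mk tbl).get? (String.ofList s) = some v) :
    ((s.length : Int)) ∈ PySem.List.sorted (PySem.Set.ofList (tbl.filterMap
      (fun kv => if kv.1.toList = [] then none else some ((kv.1.toList.length : Int))))) (fun x => x) false := by
  rw [PySem.List.mem_sorted, PySem.Set.mem_ofList, List.mem_filterMap]
  have hmem := PySem.Dict.mem_items_of_get?_eq_some _ hv
  refine ⟨(String.ofList s, v), hmem, ?_⟩
  rw [if_neg (by simp [h1])]
  simp

-- the main equivalence, for a given base offset b and minimal matching length L0
lemma pv_main (cs : List Char) (tbl : List (String × Int)) (p : Int) (b : Nat)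
    (hex : ∃ L : Nat, 1 ≤ L ∧ b + L ≤ cs.length ∧
      ((PySem.Dict.mk tbl).get? (String.ofList ((cs.drop b).take L))).isSome = true)
    (hend : p + ((Nat.find hex : Nat) : Int) ≤ (cs.length : Int))
    (hchar : ∀ t : Nat, t < Nat.find hex → b + t < cs.length ∧
      PySem.List.pyGet? cs (p + (t : Int)) = cs[b + t]?)
    (hOk : (PySem.List.slice cs (some p) (some (p + ((Nat.find hex : Nat) : Int)))).length = Nat.find hex)
    (hsl : PySem.List.slice cs (some p) (some (p + ((Nat.find hex : Nat) : Int))) = (cs.drop b).take (Nat.find hex))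
    (hm : ∀ m : Nat, 1 ≤ m → m < Nat.find hex →
      (PySem.List.slice cs (some p) (some (p + (m : Int)))).length = m →
      PySem.List.slice cs (some p) (some (p + (m : Int))) = (cs.drop b).take m) :
    pvAGo cs (PySem.Dict.mk tbl) (PySem.List.pyRange p ((cs.length : Int)) 1) []
      = pvBGo cs (PySem.Dict.mk tbl) p
          (PySem.List.sorted (PySem.Set.ofList (tbl.filterMap
            (fun kv => if kv.1.toList = [] then none else some ((kv.1.toList.length : Int))))) (fun x => x) false) := by
  set L0 := Nat.find hex with hL0
  obtain ⟨h1, hbn, hsome⟩ := Nat.find_spec hex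
  obtain ⟨v, hv⟩ := Option.isSome_iff_exists.mp hsome
  have hmin : ∀ L : Nat, 1 ≤ L → L < L0 →
      (PySem.Dict.mk tbl).get? (String.ofList ((cs.drop b).take L)) = none := by
    intro L hL1 hLlt
    have := Nat.find_min hex hLlt
    simp only [not_and] at this
    cases hs : (PySem.Dict.mk tbl).get? (String.ofList ((cs.drop b).take L)) with
    | none => rfl
    | some w =>
      exact absurd (by rw [hs]; rfl) (this hL1 (by omega))
  have hA : pvAGo cs (PySem.Dict.mk tbl) (PySem.List.pyRange p ((cs.length : Int)) 1) []
      = some (v, p + (L0 : Int)) := by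
    have := pvAGo_finds cs (PySem.Dict.mk tbl) v p b L0 hend hchar hv hmin 0 (by omega)
    simpa using this
  have hlenS : ((cs.drop b).take L0).length = L0 := by
    simp [List.length_take, List.length_drop]; omega
  have hne : (cs.drop b).take L0 ≠ [] := by
    intro h; rw [h] at hlenS; simp at hlenS; omega
  have hmemL : ((L0 : Int)) ∈ PySem.List.sorted (PySem.Set.ofList (tbl.filterMap
      (fun kv => if kv.1.toList = [] then none else some ((kv.1.toList.length : Int))))) (fun x => x) false := by
    have := pv_len_mem_lengths tbl ((cs.drop b).take L0) v hne hv
    rwa [hlenS] at this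
  have hpos : ∀ x ∈ PySem.List.sorted (PySem.Set.ofList (tbl.filterMap
      (fun kv => if kv.1.toList = [] then none else some ((kv.1.toList.length : Int))))) (fun x => x) false,
      ∃ m : Nat, x = (m : Int) ∧ 1 ≤ m := by
    intro x hx
    rw [PySem.List.mem_sorted, PySem.Set.mem_ofList, List.mem_filterMap] at hx
    obtain ⟨kv, _, hkv⟩ := hx
    by_cases hnil : kv.1.toList = []
    · simp [hnil] at hkv
    · rw [if_neg hnil] at hkv
      exact ⟨kv.1.toList.length, (Option.some.inj hkv).symm, List.length_pos_of_ne_nil hnil⟩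
  have hB := pvBGo_finds cs (PySem.Dict.mk tbl) v p b L0 hOk hsl hm hv hmin _
    (PySem.List.sorted_ofList_pairwise_lt _) hmemL hpos
  rw [hA, hB]

-- ===== VERDICT (by name: the statement is the Claim_ definition above) =====
theorem decode_huffman_stream_item_spec : Claim_equal_decode_huffman_stream_item := by
  intro bs p tbl name _ hpre
  unfold Spec_decode_huffman_stream_item decode_huffman_stream_item decode_huffman_stream_item_alt
  rcases hpre with ⟨hp0, kv, hmem, hknil, hfit, htake⟩ | ⟨hpneg, hkle, kv, hmem, hknil, hklt, htake⟩
  · -- current_pos ≥ 0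
    obtain ⟨b, rfl⟩ : ∃ b : Nat, p = (b : Int) := ⟨p.toNat, (Int.toNat_of_nonneg hp0).symm⟩
    simp only [Int.toNat_natCast] at hfit htake
    have hkl1 : 1 ≤ kv.1.toList.length := List.length_pos_of_ne_nil hknil
    have hex : ∃ L : Nat, 1 ≤ L ∧ b + L ≤ bs.toList.length ∧
        ((PySem.Dict.mk tbl).get? (String.ofList ((bs.toList.drop b).take L))).isSome = true := by
      refine ⟨kv.1.toList.length, hkl1, hfit, ?_⟩
      rw [htake]
      simpa using pv_get?_isSome_of_mem tbl kv hmem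
    have hL0n : b + Nat.find hex ≤ bs.toList.length := (Nat.find_spec hex).2.1
    have heq := pv_main bs.toList tbl (b : Int) b hex
      (by omega)
      (by
        intro t ht
        refine ⟨by omega, ?_⟩
        have h2 : (b : Int) + (t : Int) = ((b + t : Nat) : Int) := by push_cast; ring
        rw [h2, PySem.List.pyGet?_natCast])
      (by
        rw [PySem.List.slice_natCast_add]
        simp only [List.length_take, List.length_drop]
        omega)
      (PySem.List.slice_natCast_add _ _ _)
      (by intro m _ _ _; rw [PySem.List.slice_natCast_add])
    rw [heq]
  · -- current_pos < 0
    obtain ⟨k, rfl⟩ : ∃ k : Nat, p = -(k : Int) := ⟨(-p).toNat, by omega⟩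
    simp only [neg_neg, Int.toNat_natCast] at hkle hklt htake
    have hk0 : 0 < k := by omega
    have hkl1 : 1 ≤ kv.1.toList.length := List.length_pos_of_ne_nil hknil
    have hex : ∃ L : Nat, 1 ≤ L ∧ (bs.toList.length - k) + L ≤ bs.toList.length ∧
        ((PySem.Dict.mk tbl).get? (String.ofList ((bs.toList.drop (bs.toList.length - k)).take L))).isSome = true := by
      refine ⟨kv.1.toList.length, hkl1, by omega, ?_⟩
      rw [htake]
      simpa using pv_get?_isSome_of_mem tbl kv hmem
    have hL0k : Nat.find hex < k := by
      have := Nat.find_min' hex ⟨hkl1, by omega, by rw [htake]; simpa using pv_get?_isSome_of_mem tbl kv hmem⟩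
      omega
    have hsliceEq : ∀ m : Nat, 1 ≤ m → m < k →
        PySem.List.slice bs.toList (some (-(k : Int))) (some (-(k : Int) + (m : Int)))
          = (bs.toList.drop (bs.toList.length - k)).take m := by
      intro m _ hmk
      have h2 : -(k : Int) + (m : Int) = -(((k - m : Nat)) : Int) := by omega
      rw [h2, PySem.List.slice, PySem.List.clampIdx_neg_natCast bs.toList.length k hk0,
        PySem.List.clampIdx_neg_natCast bs.toList.length (k - m) (by omega)]
      congr 1
      omega
    have heq := pv_main bs.toList tbl (-(k : Int)) (bs.toList.length - k) hex
      (by omega)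
      (by
        intro t ht
        refine ⟨by omega, ?_⟩
        have h2 : -(k : Int) + (t : Int) = -(((k - t : Nat)) : Int) := by omega
        rw [h2, PySem.List.pyGet?_neg_natCast bs.toList (k - t) (by omega) (by omega)]
        congr 1
        omega)
      (by
        rw [hsliceEq (Nat.find hex) (Nat.find_spec hex).1 hL0k]
        simp only [List.length_take, List.length_drop]
        omega)
      (hsliceEq (Nat.find hex) (Nat.find_spec hex).1 hL0k)
      (by intro m hm1 hmlt _; exact hsliceEq m hm1 (by omega))
    rw [heq]
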